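-- pv_equiv track=rewrite | github.com/pypi-data/pypi-mirror-75 | packages/applot/applot-0.1.0-py3-none-any.whl/applot/util.py | extent
-- ===== SOURCE A (Python) =====
-- def extent(iterable):
--     lo = hi = None
--     for v in iterable:
--         if lo is None and hi is None:
--             lo = hi = v
--         elif v < lo:
--             lo = v
--         elif v > hi:
--             hi = v
--     return lo, hi
-- ===== SOURCE B (Python) =====
-- def extent(iterable):
--     items = list(iterable)
--     if not items:
--         return None, None
--     return min(items), max(items)
-- ===== Notes on version B (the rewrite author's own statement) =====
-- stated objective: idiomatic
-- what changed: Replaces A's single stateful branching loop over Optional lo/hi with materialize-once plus the built-in min and max library scans, guarding only the empty case.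
import Mathlib
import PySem

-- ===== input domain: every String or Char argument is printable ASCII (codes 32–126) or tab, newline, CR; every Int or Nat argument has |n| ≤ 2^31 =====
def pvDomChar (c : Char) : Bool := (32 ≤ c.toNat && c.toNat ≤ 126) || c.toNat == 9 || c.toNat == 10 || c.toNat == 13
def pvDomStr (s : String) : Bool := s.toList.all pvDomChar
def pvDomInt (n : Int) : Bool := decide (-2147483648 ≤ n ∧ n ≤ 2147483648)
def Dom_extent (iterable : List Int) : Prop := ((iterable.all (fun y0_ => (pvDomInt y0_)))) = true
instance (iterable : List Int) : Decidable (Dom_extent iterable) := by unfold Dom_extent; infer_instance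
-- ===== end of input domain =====

-- B replaces A's single stateful branching loop with materialize + built-in min/max scans (idiomatic, same cost).

-- ===== PORT A =====
-- A's for-loop over the state (lo, hi); branches in A's order.
-- The mixed branches (some/none, none/some) are unreachable: A only ever has both None or both set.
def extentGo (xs : List Int) (lo hi : Option Int) : Option Int × Option Int :=
  match xs with
  | [] => (lo, hi)
  | v :: t =>
    match lo, hi with
    | none, none => extentGo t (some v) (some v)
    | some l, some h =>
        if v < l then extentGo t (some v) (some h)
        else if v > h then extentGo t (some l) (some v)
        else extentGo t (some l) (some h)
    | _, _ => extentGo t lo hi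

def extent (iterable : List Int) : Option Int × Option Int :=
  extentGo iterable none none

-- ===== PORT B =====
def extent_alt (iterable : List Int) : Option Int × Option Int :=
  match iterable with
  | [] => (none, none)
  | h :: t => (some (t.foldl min h), some (t.foldl max h))

-- ===== PRECONDITION & SPEC =====
def Spec_extent (iterable : List Int) (out : Option Int × Option Int) : Prop := out = extent_alt iterable
instance (iterable : List Int) (out : Option Int × Option Int) : Decidable (Spec_extent iterable out) := by unfold Spec_extent; infer_instance

-- ===== CLAIM (what is proved, stated in full; the proofs are below) =====
def Claim_equal_extent : Prop := ∀ (iterable : List Int), Dom_extent iterable → Spec_extent iterable (extent iterable)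

-- ===== LEMMAS AND PROOFS =====
theorem extentGo_some (t : List Int) : ∀ (l h : Int), l ≤ h →
    extentGo t (some l) (some h) = (some (t.foldl min l), some (t.foldl max h)) := by
  induction t with
  | nil => intro l h _; simp [extentGo]
  | cons v t ih =>
    intro l h hlh
    simp only [extentGo, List.foldl]
    split_ifs with h1 h2
    · have hm : min l v = v := by omega
      have hx : max h v = h := by omega
      rw [hm, hx]; exact ih v h (by omega)
    · have hm : min l v = l := by omega
      have hx : max h v = v := by omega
      rw [hm, hx]; exact ih l v (by omega)
    · have hm : min l v = l := by omega
      have hx : max h v = h := by omega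
      rw [hm, hx]; exact ih l h hlh

-- ===== VERDICT (by name: the statement is the Claim_ definition above) =====
theorem extent_spec : Claim_equal_extent := by
  intro iterable _
  unfold Spec_extent extent extent_alt
  cases iterable with
  | nil => simp [extentGo]
  | cons h t => simp only [extentGo]; exact extentGo_some t h h le_rfl
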